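-- pv_equiv track=rewrite | github.com/koyomi-san/trabajo-grado | src/calculosdris.py | conteoRelaciones
-- ===== SOURCE A (Python) =====
-- def conteoRelaciones(nutrientes, relaciones):
--
--     apariciones = len(nutrientes)*[0]
--     cantidadRelacionesNutriente = dict(zip(nutrientes, apariciones))
--
--     nutrientesRegex = [nutriente + ":" for nutriente in nutrientes]
--
--     for nutriente in nutrientes:
--         for relacion in relaciones:
--             if relacion.startswith(nutriente):
--                 cantidadRelacionesNutriente[nutriente] = cantidadRelacionesNutriente[nutriente] + 1
--
--     return cantidadRelacionesNutriente, nutrientesRegex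
-- ===== SOURCE B (Python) =====
-- def conteoRelaciones(nutrientes, relaciones):
--     # Count, for every nutriente, how many relaciones start with it, by
--     # tallying every prefix of every relacion once (hash of prefixes = flat trie),
--     # then looking each nutriente up -- one pass over the relaciones.
--     prefijos = {}
--     for relacion in relaciones:
--         for i in range(len(relacion) + 1):
--             p = relacion[:i]
--             prefijos[p] = prefijos.get(p, 0) + 1
--     conteo = {nutriente: prefijos.get(nutriente, 0) for nutriente in nutrientes}
--     return conteo, [nutriente + ":" for nutriente in nutrientes]
-- ===== Notes on version B (the rewrite author's own statement) =====
-- stated objective: alternative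
-- what changed: Instead of scanning all relaciones for every nutriente (nested loops), B tallies every prefix of every relacion once into a hash map (a flattened trie) and then answers each nutriente with one lookup.
-- outside the precondition, e.g. on conteoRelaciones(['a', 'a'], ['ab']): A returns ({'a': 2}, ['a:', 'a:']), B returns ({'a': 1}, ['a:', 'a:'])
import Mathlib
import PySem

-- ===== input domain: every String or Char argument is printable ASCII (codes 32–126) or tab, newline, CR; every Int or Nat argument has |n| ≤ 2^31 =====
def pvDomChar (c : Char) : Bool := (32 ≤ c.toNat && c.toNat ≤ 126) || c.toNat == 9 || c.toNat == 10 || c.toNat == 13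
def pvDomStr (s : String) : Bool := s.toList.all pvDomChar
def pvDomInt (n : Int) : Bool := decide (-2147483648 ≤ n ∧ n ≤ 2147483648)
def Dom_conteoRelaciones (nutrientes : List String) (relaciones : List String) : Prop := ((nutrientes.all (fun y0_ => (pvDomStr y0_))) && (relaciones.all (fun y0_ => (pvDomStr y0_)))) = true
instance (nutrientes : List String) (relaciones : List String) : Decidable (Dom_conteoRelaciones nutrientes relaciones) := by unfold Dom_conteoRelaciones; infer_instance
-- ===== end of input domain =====

-- B counts every relacion once by tallying all its prefixes into one hash map (a flattened trie),
-- instead of A's per-nutriente scan of all relaciones; return value only, no argument is mutated.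

-- ===== PORT A =====
def conteoRelaciones (nutrientes : List String) (relaciones : List String) : (List (String × Int)) × List String :=
  let apariciones : List Int := List.replicate nutrientes.length 0
  let cantidad0 : PySem.Dict String Int := PySem.Dict.ofList (nutrientes.zip apariciones)
  let nutrientesRegex : List String := nutrientes.map (fun nutriente => nutriente ++ ":")
  -- Python's `d[nutriente] + 1` is ported as getD: the key is always present (the dict was built from nutrientes)
  let cantidad : PySem.Dict String Int := nutrientes.foldl (fun d nutriente =>
      relaciones.foldl (fun d relacion =>
        if PySem.Str.startswith relacion nutriente then
          d.insert nutriente (d.getD nutriente 0 + 1)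
        else d) d) cantidad0
  (cantidad.items, nutrientesRegex)

-- ===== PORT B =====
def conteoRelaciones_alt (nutrientes : List String) (relaciones : List String) : (List (String × Int)) × List String :=
  let prefijos : PySem.Dict String Int :=
    relaciones.foldl (fun d relacion =>
      (PySem.List.pyRange 0 (PySem.Str.len relacion + 1) 1).foldl (fun d i =>
        let p := PySem.Str.slice relacion none (some i)
        d.insert p (d.getD p 0 + 1)) d)
      PySem.Dict.empty
  let conteo : PySem.Dict String Int :=
    nutrientes.foldl (fun d nutriente => d.insert nutriente (prefijos.getD nutriente 0)) PySem.Dict.empty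
  (conteo.items, nutrientes.map (fun nutriente => nutriente ++ ":"))

-- ===== PRECONDITION & SPEC =====
-- Pre_ excludes lists with duplicate nutrientes: a duplicated dict key is a corner where A's count
-- (multiplied by the key's multiplicity) and B's plain count are both defensible readings.
def Pre_conteoRelaciones (nutrientes : List String) (_relaciones : List String) : Prop :=
  nutrientes.Nodup
instance (nutrientes : List String) (relaciones : List String) : Decidable (Pre_conteoRelaciones nutrientes relaciones) := by unfold Pre_conteoRelaciones; infer_instance
def pvWitness_conteoRelaciones : List String × List String := (["N", "P:K"], ["N:P", "N", "P:K:x", "Q"])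

def Spec_conteoRelaciones (nutrientes : List String) (relaciones : List String) (out : (List (String × Int)) × List String) : Prop := out = conteoRelaciones_alt nutrientes relaciones
instance (nutrientes : List String) (relaciones : List String) (out : (List (String × Int)) × List String) : Decidable (Spec_conteoRelaciones nutrientes relaciones out) := by unfold Spec_conteoRelaciones; infer_instance

-- ===== CLAIM (what is proved, stated in full; the proofs are below) =====
def Claim_equal_conteoRelaciones : Prop := ∀ (nutrientes : List String) (relaciones : List String), Dom_conteoRelaciones nutrientes relaciones → Pre_conteoRelaciones nutrientes relaciones → Spec_conteoRelaciones nutrientes relaciones (conteoRelaciones nutrientes relaciones)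

-- ===== LEMMAS AND PROOFS =====

-- abbreviation used only in proofs: how many relaciones start with n
def pvCnt (relaciones : List String) (n : String) : Int :=
  (relaciones.countP (fun r => PySem.Str.startswith r n) : Int)

-- zip with a same-length replicate of zeros is a map
theorem pv_zip_replicate (ns : List String) :
    ns.zip (List.replicate ns.length (0 : Int)) = ns.map (fun n => (n, (0 : Int))) := by
  induction ns with
  | nil => rfl
  | cons n ns ih => simp [List.replicate, ih]

-- the initial dict has getD = 0 everywhere
theorem pv_getD_init (ns : List String) :
    ∀ (d : PySem.Dict String Int), (∀ m, d.getD m 0 = 0) →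
      ∀ m, ((ns.map (fun n => (n, (0 : Int)))).foldl (fun acc p => acc.insert p.1 p.2) d).getD m 0 = 0 := by
  induction ns with
  | nil => intro d h m; exact h m
  | cons n ns ih =>
      intro d h m
      simp only [List.map_cons, List.foldl_cons]
      refine ih _ (fun m' => ?_) m
      rw [PySem.Dict.getD_insert]
      split <;> simp [h]

-- A's inner loop: getD after folding the relaciones
theorem pv_innerA_getD (n : String) (rs : List String) :
    ∀ (d : PySem.Dict String Int) (m : String),
      (rs.foldl (fun d r => if PySem.Str.startswith r n then d.insert n (d.getD n 0 + 1) else d) d).getD m 0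
        = d.getD m 0 + (if m = n then (rs.countP (fun r => PySem.Str.startswith r n) : Int) else 0) := by
  induction rs with
  | nil => intro d m; simp
  | cons r rs ih =>
      intro d m
      simp only [List.foldl_cons, List.countP_cons]
      have hr' : PySem.Chars.startswith r.toList n.toList = PySem.Str.startswith r n :=
        (PySem.Str.startswith_eq r n).symm
      by_cases hr : PySem.Str.startswith r n
      · have hc : PySem.Chars.startswith r.toList n.toList = true := by rw [hr']; exact hr
        rw [if_pos hr, ih, PySem.Dict.getD_insert]
        by_cases hm : m = n
        · subst hm; simp [hc]; ring
        · simp [hm]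
      · have hc : PySem.Chars.startswith r.toList n.toList = false := by rw [hr']; simpa using hr
        rw [if_neg hr, ih]
        by_cases hm : m = n
        · subst hm; simp [hc]
        · simp [hm]

-- A's inner loop keeps the key set when n is already a key
theorem pv_innerA_keys (n : String) (rs : List String) :
    ∀ (d : PySem.Dict String Int), n ∈ d.keys →
      (rs.foldl (fun d r => if PySem.Str.startswith r n then d.insert n (d.getD n 0 + 1) else d) d).keys = d.keys := by
  induction rs with
  | nil => intro d _; rfl
  | cons r rs ih =>
      intro d hn
      simp only [List.foldl_cons]
      by_cases hr : PySem.Str.startswith r n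
      · rw [if_pos hr]
        have hc : d.contains n = true := (PySem.Dict.contains_iff_mem_keys d n).mpr hn
        have hk := PySem.Dict.keys_insert_of_contains d (d.getD n 0 + 1) hc
        rw [ih _ (by rw [hk]; exact hn), hk]
      · rw [if_neg hr]; exact ih d hn

-- A's outer loop: getD after folding the nutrientes
theorem pv_outerA_getD (rs : List String) (ns : List String) :
    ∀ (d : PySem.Dict String Int) (m : String),
      (ns.foldl (fun d n => rs.foldl (fun d r => if PySem.Str.startswith r n then d.insert n (d.getD n 0 + 1) else d) d) d).getD m 0
        = d.getD m 0 + (ns.count m : Int) * pvCnt rs m := by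
  induction ns with
  | nil => intro d m; simp
  | cons n ns ih =>
      intro d m
      simp only [List.foldl_cons]
      rw [ih, pv_innerA_getD, List.count_cons]
      by_cases hm : m = n
      · subst hm; simp [pvCnt]; push_cast; ring
      · have : (n == m) = false := by simp [Ne.symm hm]
        simp [hm, this]

-- A's outer loop keeps the key set when every nutriente is already a key
theorem pv_outerA_keys (rs : List String) (ns : List String) :
    ∀ (d : PySem.Dict String Int), (∀ n ∈ ns, n ∈ d.keys) →
      (ns.foldl (fun d n => rs.foldl (fun d r => if PySem.Str.startswith r n then d.insert n (d.getD n 0 + 1) else d) d) d).keys = d.keys := by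
  induction ns with
  | nil => intro d _; rfl
  | cons n ns ih =>
      intro d h
      simp only [List.foldl_cons]
      have hk := pv_innerA_keys n rs d (h n (by simp))
      rw [ih _ (fun x hx => by rw [hk]; exact h x (by simp [hx])), hk]

-- the list of prefixes of r contains n once iff r startswith n, else not at all
theorem pv_count_prefixes (r n : String) :
    List.count n ((PySem.List.pyRange 0 (PySem.Str.len r + 1) 1).map
      (fun i => PySem.Str.slice r none (some i))) = if PySem.Str.startswith r n then 1 else 0 := by
  have hlen : PySem.Str.len r + 1 = ((r.toList.length + 1 : Nat) : Int) := by
    rw [PySem.Str.len_eq]; push_cast; ring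
  rw [hlen, PySem.List.pyRange_one, List.map_map]
  have hsl : ∀ k : Nat, (PySem.Str.slice r none (some ((0:Int) + (k:Int)))).toList = r.toList.take k := by
    intro k
    rw [PySem.Str.toList_slice, PySem.Chars.slice_eq_listSlice]
    have h0k : (0:Int) + (k:Int) = ((k:Nat):Int) := by push_cast; ring
    rw [h0k, PySem.List.slice_to _ (by positivity), Int.toNat_natCast]
  have hsub : ((r.toList.length + 1 : Nat) : Int) - 0 = ((r.toList.length + 1 : Nat) : Int) := by ring
  rw [hsub, Int.toNat_natCast, List.count_eq_countP, List.countP_map]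
  by_cases hsw : PySem.Str.startswith r n
  · have hpre : n.toList <+: r.toList := by
      rw [PySem.Str.startswith_eq] at hsw
      exact (PySem.Chars.startswith_iff _ _).mp hsw
    have hle : n.toList.length ≤ r.toList.length := hpre.length_le
    have hcg : List.countP ((fun x => x == n) ∘ (fun i => PySem.Str.slice r none (some i)) ∘ fun k : Nat => (0:Int) + (k:Int)) (List.range (r.toList.length + 1))
        = List.countP (fun k => k == n.toList.length) (List.range (r.toList.length + 1)) := by
      refine List.countP_congr (fun k hk => ?_)
      rw [List.mem_range] at hk
      simp only [Function.comp_apply, beq_iff_eq]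
      constructor
      · intro he
        have ht : r.toList.take k = n.toList := by rw [← hsl k, he]
        have := congrArg List.length ht
        rw [List.length_take] at this
        omega
      · intro hk'
        subst hk'
        apply String.toList_inj.mp
        rw [hsl]
        exact (List.prefix_iff_eq_take.mp hpre).symm
    rw [hcg, ← List.count_eq_countP, List.count_range]
    have hc : PySem.Chars.startswith r.toList n.toList = true := by
      rw [← PySem.Str.startswith_eq]; exact hsw
    have hle' : n.length ≤ r.length := by simpa using hle
    simp [hc, hle']
  · rw [if_neg hsw]
    apply List.countP_eq_zero.mpr
    intro k hk
    simp only [Function.comp_apply, beq_iff_eq]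
    intro he
    apply hsw
    have ht : r.toList.take k = n.toList := by rw [← hsl k, he]
    rw [PySem.Str.startswith_eq]
    refine (PySem.Chars.startswith_iff _ _).mpr ?_
    rw [← ht]
    exact List.take_prefix k r.toList

-- B's prefix-counter loop: getD after folding the relaciones
theorem pv_altB_getD (rs : List String) :
    ∀ (d : PySem.Dict String Int) (n : String),
      (rs.foldl (fun d relacion =>
        (PySem.List.pyRange 0 (PySem.Str.len relacion + 1) 1).foldl (fun d i =>
          d.insert (PySem.Str.slice relacion none (some i)) (d.getD (PySem.Str.slice relacion none (some i)) 0 + 1)) d) d).getD n 0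
        = d.getD n 0 + pvCnt rs n := by
  induction rs with
  | nil => intro d n; simp [pvCnt]
  | cons r rs ih =>
      intro d n
      simp only [List.foldl_cons]
      rw [ih]
      have hmap : (PySem.List.pyRange 0 (PySem.Str.len r + 1) 1).foldl (fun d i =>
          d.insert (PySem.Str.slice r none (some i)) (d.getD (PySem.Str.slice r none (some i)) 0 + 1)) d
          = ((PySem.List.pyRange 0 (PySem.Str.len r + 1) 1).map (fun i => PySem.Str.slice r none (some i))).foldl
              (fun d x => d.insert x (d.getD x 0 + 1)) d := by
        rw [List.foldl_map]
      rw [hmap, PySem.Dict.getD_foldl_insert_add_one, pv_count_prefixes]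
      simp only [pvCnt, List.countP_cons]
      have hr' : PySem.Chars.startswith r.toList n.toList = PySem.Str.startswith r n :=
        (PySem.Str.startswith_eq r n).symm
      by_cases hr : PySem.Str.startswith r n
      · have hc : PySem.Chars.startswith r.toList n.toList = true := by rw [hr']; exact hr
        simp [hc]; ring
      · have hc : PySem.Chars.startswith r.toList n.toList = false := by rw [hr']; simpa using hr
        simp [hc]

-- ===== VERDICT (by name: the statement is the Claim_ definition above) =====
theorem conteoRelaciones_spec : Claim_equal_conteoRelaciones := by
  intro ns rs _ hnd
  unfold Spec_conteoRelaciones conteoRelaciones conteoRelaciones_alt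
  simp only
  refine Prod.ext ?_ rfl
  -- initial dict of A
  have hzip := pv_zip_replicate ns
  -- keys of the initial dict are exactly ns
  have hkeys0 : (PySem.Dict.ofList (ns.zip (List.replicate ns.length (0:Int)))).keys = ns := by
    rw [hzip]
    show (PySem.Dict.empty.update (ns.map (fun n => (n, (0:Int))))).keys = ns
    unfold PySem.Dict.update
    rw [PySem.Dict.keys_foldl_insert_key (ns.map (fun n => (n, (0:Int)))) Prod.fst (fun d p => p.2) PySem.Dict.empty]
    rw [PySem.Dict.keys_empty]
    have : (ns.map (fun n => (n, (0:Int)))).map Prod.fst = ns := by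
      rw [List.map_map]
      simp [Function.comp_def]
    rw [this]
    have := PySem.Set.update_eq_append_of_disjoint ([] : PySem.Set String) ns hnd (by simp)
    simpa using this
  have hgetD0 : ∀ m, (PySem.Dict.ofList (ns.zip (List.replicate ns.length (0:Int)))).getD m 0 = 0 := by
    intro m
    rw [hzip]
    show (PySem.Dict.empty.update (ns.map (fun n => (n, (0:Int))))).getD m 0 = 0
    unfold PySem.Dict.update
    exact pv_getD_init ns PySem.Dict.empty (by simp) m
  -- A's final dict
  set d0 := PySem.Dict.ofList (ns.zip (List.replicate ns.length (0:Int))) with hd0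
  have hkeysA : (ns.foldl (fun d n => rs.foldl (fun d r => if PySem.Str.startswith r n then d.insert n (d.getD n 0 + 1) else d) d) d0).keys = ns := by
    rw [pv_outerA_keys rs ns d0 (fun n hn => by rw [hkeys0]; exact hn), hkeys0]
  have hitemsA : (ns.foldl (fun d n => rs.foldl (fun d r => if PySem.Str.startswith r n then d.insert n (d.getD n 0 + 1) else d) d) d0).items
      = ns.map (fun k => (k, pvCnt rs k)) := by
    rw [PySem.Dict.items_eq_map_keys _ (by rw [hkeysA]; exact hnd) 0, hkeysA]
    refine List.map_congr_left (fun k hk => ?_)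
    rw [pv_outerA_getD, hgetD0, List.count_eq_one_of_mem hnd hk]
    simp
  -- B's final dict
  have hitemsB : (ns.foldl (fun d n => d.insert n
        ((rs.foldl (fun d relacion =>
          (PySem.List.pyRange 0 (PySem.Str.len relacion + 1) 1).foldl (fun d i =>
            d.insert (PySem.Str.slice relacion none (some i)) (d.getD (PySem.Str.slice relacion none (some i)) 0 + 1)) d) PySem.Dict.empty).getD n 0))
        PySem.Dict.empty).items = ns.map (fun k => (k, pvCnt rs k)) := by
    rw [PySem.Dict.items_foldl_insert_fresh ns (fun n => n) _ PySem.Dict.empty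
        (fun a _ => PySem.Dict.contains_empty a) (by simpa using hnd)]
    have hemp : (PySem.Dict.empty : PySem.Dict String Int).items = [] := rfl
    rw [hemp, List.nil_append]
    refine List.map_congr_left (fun k _ => ?_)
    rw [pv_altB_getD rs PySem.Dict.empty k]
    simp
  rw [hitemsA, hitemsB]
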